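-- pv_equiv track=rewrite | github.com/AppleLamps/open-router-code-review | ai-code-reviewer/core/code_analyzer.py | prioritize_files
-- ===== SOURCE A (Python) =====
-- from typing import Dict, List, Optional, Any
--
-- def prioritize_files(files: List[Dict[str, object]]) -> List[Dict[str, object]]:
--     priority_order = ["main", "index", "app", "server", "config", "auth", "security", "database", "api"]
--
--     def score(file_item: Dict[str, object]) -> int:
--         name = str(file_item.get("name", "")).lower()
--         for i, key in enumerate(priority_order):
--             if key in name:
--                 return len(priority_order) - i
--         return 0
--
--     return sorted(files, key=score, reverse=True)
-- ===== SOURCE B (Python) =====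
-- def prioritize_files(files):
--     priority_order = ["main", "index", "app", "server", "config", "auth", "security", "database", "api"]
--     n = len(priority_order)
--
--     def score(file_item):
--         name = str(file_item.get("name", "")).lower()
--         hits = [n - i for i, key in enumerate(priority_order) if key in name]
--         return hits[0] if hits else 0
--
--     result = []
--     for level in range(n, -1, -1):
--         result.extend(f for f in files if score(f) == level)
--     return result
-- ===== Notes on version B (the rewrite author's own statement) =====
-- stated objective: alternative
-- what changed: Replaces sorted(files, key=score, reverse=True) by staged filter passes: for each score level from the highest down to 0, the files whose score equals that level are appended in original order, reproducing the stable reverse-sorted order; the score itself is computed via a comprehension over enumerate instead of an early-return loop.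
import Mathlib
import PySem

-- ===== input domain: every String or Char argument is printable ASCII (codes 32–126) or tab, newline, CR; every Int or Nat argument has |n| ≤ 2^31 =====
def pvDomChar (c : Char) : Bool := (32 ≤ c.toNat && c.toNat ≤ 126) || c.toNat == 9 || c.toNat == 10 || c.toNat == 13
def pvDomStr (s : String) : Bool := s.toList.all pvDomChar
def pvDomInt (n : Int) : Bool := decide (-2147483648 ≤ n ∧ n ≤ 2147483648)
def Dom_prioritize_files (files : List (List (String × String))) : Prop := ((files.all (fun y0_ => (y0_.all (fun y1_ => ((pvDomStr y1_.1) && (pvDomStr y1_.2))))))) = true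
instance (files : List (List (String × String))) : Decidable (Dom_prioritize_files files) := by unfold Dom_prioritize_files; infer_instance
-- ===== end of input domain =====

-- B replaces sorted(files, key=score, reverse=True) by ten staged filter passes, one per score
-- level from high to low, appending the matching files of each level; objective: alternative.

-- ===== PORT A =====
-- priority_order of A
def pvPriorityOrder : List String :=
  ["main", "index", "app", "server", "config", "auth", "security", "database", "api"]

-- A's score loop: 'for i, key in enumerate(priority_order): if key in name: return len(priority_order)-i'
def pvScoreGo (name : String) : List String → Nat → Int
  | [], _ => 0
  | k :: rest, i =>
      if PySem.Str.isIn k name then (pvPriorityOrder.length : Int) - (i : Int)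
      else pvScoreGo name rest (i + 1)

-- A's score(file_item)
def pvScore (f : List (String × String)) : Int :=
  pvScoreGo (PySem.Str.lower (PySem.Dict.getD (PySem.Dict.mk f) "name" "")) pvPriorityOrder 0

def prioritize_files (files : List (List (String × String))) : List (List (String × String)) :=
  PySem.List.sorted files pvScore true

-- ===== PORT B =====
-- priority_order of B
def pvPriorityOrderB : List String :=
  ["main", "index", "app", "server", "config", "auth", "security", "database", "api"]

-- B's score: hits = [n - i for i, key in enumerate(priority_order) if key in name]; hits[0] if hits else 0
def pvScoreB (f : List (String × String)) : Int :=
  let name := PySem.Str.lower (PySem.Dict.getD (PySem.Dict.mk f) "name" "")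
  let hits := (PySem.List.enumerate pvPriorityOrderB).filterMap
      (fun ik => if PySem.Str.isIn ik.2 name then some ((pvPriorityOrderB.length : Int) - ik.1) else none)
  hits.headD 0

-- 'result = []; for level in range(n, -1, -1): result.extend(f for f in files if score(f) == level)'
def prioritize_files_alt (files : List (List (String × String))) : List (List (String × String)) :=
  (PySem.List.pyRange (pvPriorityOrderB.length : Int) (-1) (-1)).foldl
    (fun result level => result ++ files.filter (fun f => decide (pvScoreB f = level))) []

-- ===== PRECONDITION & SPEC =====
def Spec_prioritize_files (files : List (List (String × String))) (out : List (List (String × String))) : Prop := out = prioritize_files_alt files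
instance (files : List (List (String × String))) (out : List (List (String × String))) : Decidable (Spec_prioritize_files files out) := by unfold Spec_prioritize_files; infer_instance

-- ===== CLAIM (what is proved, stated in full; the proofs are below) =====
def Claim_equal_prioritize_files : Prop := ∀ (files : List (List (String × String))), Dom_prioritize_files files → Spec_prioritize_files files (prioritize_files files)

-- ===== LEMMAS AND PROOFS =====

-- the two local score functions agree
theorem scoreGo_eq_hits (name : String) :
    ∀ (l : List String) (i : Nat),
      pvScoreGo name l i
        = ((PySem.List.enumerate l (i : Int)).filterMap
            (fun ik => if PySem.Str.isIn ik.2 name then some ((pvPriorityOrderB.length : Int) - ik.1) else none)).headD 0 := by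
  intro l
  induction l with
  | nil => intro i; simp [pvScoreGo, PySem.List.enumerate_nil]
  | cons k rest ih =>
      intro i
      rw [PySem.List.enumerate_cons]
      simp only [pvScoreGo, List.filterMap_cons]
      split
      · simp [pvPriorityOrder, pvPriorityOrderB]
      · have : ((i : Int) + 1) = ((i + 1 : Nat) : Int) := by push_cast; ring
        rw [this, ih (i + 1)]

theorem scoreB_eq (f : List (String × String)) : pvScoreB f = pvScore f := by
  rw [pvScoreB, pvScore]
  have h := scoreGo_eq_hits (PySem.Str.lower (PySem.Dict.getD (PySem.Dict.mk f) "name" "")) pvPriorityOrder 0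
  rw [h]
  rfl

-- the score is between 0 and 9
theorem pvScoreGo_bounds (name : String) :
    ∀ (l : List String) (i : Nat), (i : Int) + l.length = pvPriorityOrder.length →
      0 ≤ pvScoreGo name l i ∧ pvScoreGo name l i ≤ (pvPriorityOrder.length : Int) := by
  intro l
  induction l with
  | nil => intro i h; simp [pvScoreGo]
  | cons k rest ih =>
      intro i h
      simp only [pvScoreGo]
      split
      · simp only [List.length_cons] at h; push_cast at h ⊢; omega
      · exact ih (i + 1) (by simp only [List.length_cons] at h; push_cast at h ⊢; omega)

theorem pvScore_bounds (f : List (String × String)) :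
    0 ≤ pvScore f ∧ pvScore f ≤ 9 := by
  have := pvScoreGo_bounds
    (PySem.Str.lower (PySem.Dict.getD (PySem.Dict.mk f) "name" "")) pvPriorityOrder 0 (by decide)
  simpa [pvScore, pvPriorityOrder] using this

theorem insertBy_cons {α : Type} (before : α → α → Bool) (x y : α) (ys : List α) :
    PySem.List.insertBy before x (y :: ys)
      = if before x y then x :: y :: ys else y :: PySem.List.insertBy before x ys := rfl

theorem insertBy_append_left {α : Type} (before : α → α → Bool) (x : α) (l m : List α)
    (h : ∀ y ∈ l, before x y = false) :
    PySem.List.insertBy before x (l ++ m) = l ++ PySem.List.insertBy before x m := by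
  induction l with
  | nil => simp
  | cons a t ih =>
      have ha : before x a = false := h a (by simp)
      rw [List.cons_append, insertBy_cons, ha]
      simp only [Bool.false_eq_true, if_false]
      rw [ih (fun y hy => h y (List.mem_cons_of_mem _ hy)), List.cons_append]

theorem insertBy_all_true {α : Type} (before : α → α → Bool) (x : α) (m : List α)
    (h : ∀ y ∈ m, before x y = true) :
    PySem.List.insertBy before x m = x :: m := by
  cases m with
  | nil => rfl
  | cons a t => rw [insertBy_cons, if_pos (h a (by simp))]

-- per-level filtered segments of p
def pvSeg (p : List (List (String × String))) (lvls : List Int) : List (List (String × String)) :=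
  (lvls.map (fun l => p.filter (fun f => decide (pvScore f = l)))).flatten

theorem mem_seg_score {p : List (List (String × String))} {lvls : List Int}
    {y : List (String × String)} (hy : y ∈ pvSeg p lvls) : pvScore y ∈ lvls := by
  rcases List.mem_flatten.mp hy with ⟨b, hb, hyb⟩
  rcases List.mem_map.mp hb with ⟨l, hl, rfl⟩
  have := (List.mem_filter.mp hyb).2
  simp only [decide_eq_true_eq] at this
  rwa [this]

-- stable insertion of x into the level segments of p extends level (score x) at its end
theorem ins_seg (x : List (String × String)) (p : List (List (String × String))) :
    ∀ (lvls : List Int), lvls.Pairwise (· > ·) → pvScore x ∈ lvls →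
      PySem.List.insertBy (fun a b => decide (pvScore b < pvScore a)) x (pvSeg p lvls)
        = pvSeg (p ++ [x]) lvls := by
  intro lvls
  induction lvls with
  | nil => intro _ hmem; simp at hmem
  | cons l t ih =>
      intro hp hmem
      have hgt : ∀ l' ∈ t, l > l' := fun l' hl' => (List.pairwise_cons.mp hp).1 l' hl'
      have hpt : t.Pairwise (· > ·) := (List.pairwise_cons.mp hp).2
      simp only [pvSeg, List.map_cons, List.flatten_cons] at *
      by_cases hx : pvScore x = l
      · -- x lands at the end of this level's segment
        rw [insertBy_append_left _ _ _ _ (by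
              intro y hy
              have := (List.mem_filter.mp hy).2
              simp only [decide_eq_true_eq] at this
              simp [this, hx])]
        rw [insertBy_all_true _ _ _ (by
              intro y hy
              have hyt : pvScore y ∈ t := mem_seg_score (lvls := t) (by simpa [pvSeg] using hy)
              have := hgt _ hyt
              simp only [decide_eq_true_eq]
              omega)]
        have hhead : (p ++ [x]).filter (fun f => decide (pvScore f = l))
            = p.filter (fun f => decide (pvScore f = l)) ++ [x] := by
          rw [List.filter_append]; simp [hx]
        have htail : t.map (fun l' => (p ++ [x]).filter (fun f => decide (pvScore f = l')))
            = t.map (fun l' => p.filter (fun f => decide (pvScore f = l'))) := by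
          apply List.map_congr_left
          intro l' hl'
          have hne : pvScore x ≠ l' := by have := hgt _ hl'; omega
          rw [List.filter_append]
          simp [hne]
        rw [hhead, htail, List.append_assoc]
        simp
      · -- x belongs to a lower level: skip this segment
        have hmt : pvScore x ∈ t := by
          rcases List.mem_cons.mp hmem with h | h
          · exact absurd h hx
          · exact h
        have hls : l > pvScore x := hgt _ hmt
        rw [insertBy_append_left _ _ _ _ (by
              intro y hy
              have := (List.mem_filter.mp hy).2
              simp only [decide_eq_true_eq] at this
              simp only [decide_eq_false_iff_not, not_lt, this]
              omega)]
        have hhead : (p ++ [x]).filter (fun f => decide (pvScore f = l))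
            = p.filter (fun f => decide (pvScore f = l)) := by
          rw [List.filter_append]; simp [hx]
        rw [ih hpt hmt, hhead]

-- the descending level list used by B
def pvLevels : List Int := [9, 8, 7, 6, 5, 4, 3, 2, 1, 0]

theorem score_mem_levels (f : List (String × String)) : pvScore f ∈ pvLevels := by
  obtain ⟨h0, h9⟩ := pvScore_bounds f
  simp only [pvLevels, List.mem_cons, List.not_mem_nil, or_false]
  omega

-- the generalized loop correspondence: insertion sort over files = accumulated level segments
theorem loop_eq :
    ∀ (files p : List (List (String × String))),
      files.foldl (fun acc x => PySem.List.insertBy (fun a b => decide (pvScore b < pvScore a)) x acc)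
          (pvSeg p pvLevels)
        = pvSeg (p ++ files) pvLevels := by
  intro files
  induction files with
  | nil => intro p; simp
  | cons f rest ih =>
      intro p
      simp only [List.foldl_cons]
      rw [ins_seg f p pvLevels (by decide) (score_mem_levels f), ih (p ++ [f])]
      simp

-- ===== VERDICT (by name: the statement is the Claim_ definition above) =====
theorem scoreB_fun : pvScoreB = pvScore := funext scoreB_eq

theorem prioritize_files_spec : Claim_equal_prioritize_files := by
  intro files _
  show prioritize_files files = prioritize_files_alt files
  unfold prioritize_files prioritize_files_alt
  rw [PySem.List.sorted_rev_eq_foldl_insertBy]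
  rw [PySem.List.foldl_append_eq_flatMap]
  have hrange : PySem.List.pyRange (pvPriorityOrderB.length : Int) (-1) (-1) = pvLevels := by
    have h9 : (pvPriorityOrderB.length : Int) = 9 := by decide
    rw [h9, PySem.List.pyRange_neg_one]
    decide
  rw [hrange]
  simp only [scoreB_fun, List.nil_append, List.flatMap_def]
  have h := loop_eq files []
  simpa [pvSeg] using h
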